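-- pv_equiv track=rewrite | github.com/goracle/lattice-fitter | latfit/utilities/postfit/paired_energies_phases.py | geten
-- ===== SOURCE A (Python) =====
-- def geten(line):
--     """Parse 'Loaded' line for energy, as in
--     Loaded: <...> '0.524(11)']
--     return '0.524(11)'
--     """
--     spl = line.split("'")
--     ret = None
--     for it1 in spl:
--         if len(it1) < 2: # hack to prevent strings like '4'
--             continue
--         flag = 0
--         for dig in it1:
--             if dig in ('.', ')', '('):
--                 continue
--             flag = 0
--             try:
--                 int(dig)
--             except ValueError:
--                 break
--             flag = 1
--         if flag:
--             ret = it1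
--             break
--     return ret
-- ===== SOURCE B (Python) =====
-- def geten(line):
--     # single left-to-right scan: no split list is built; quote boundaries are
--     # detected on the fly while the current segment's validity is tracked
--     buf = []
--     ndig = 0
--     ok = True
--     for ch in line:
--         if ch == "'":
--             if ok and ndig and len(buf) >= 2:
--                 return ''.join(buf)
--             buf = []
--             ndig = 0
--             ok = True
--         elif '0' <= ch <= '9':
--             buf.append(ch)
--             ndig += 1
--         elif ch in '.()':
--             buf.append(ch)
--         else:
--             buf.append(ch)
--             ok = False
--     if ok and ndig and len(buf) >= 2:
--         return ''.join(buf)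
--     return None
-- ===== Notes on version B (the rewrite author's own statement) =====
-- stated objective: alternative
-- what changed: Replaces A's split-into-tokens-then-test-each-token design (split on quotes, nested per-token character loop with a flag and break) by a single left-to-right character scan that never builds the split list: it tracks the current segment's buffer, digit count and validity flag, and decides at each quote boundary.
import Mathlib
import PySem

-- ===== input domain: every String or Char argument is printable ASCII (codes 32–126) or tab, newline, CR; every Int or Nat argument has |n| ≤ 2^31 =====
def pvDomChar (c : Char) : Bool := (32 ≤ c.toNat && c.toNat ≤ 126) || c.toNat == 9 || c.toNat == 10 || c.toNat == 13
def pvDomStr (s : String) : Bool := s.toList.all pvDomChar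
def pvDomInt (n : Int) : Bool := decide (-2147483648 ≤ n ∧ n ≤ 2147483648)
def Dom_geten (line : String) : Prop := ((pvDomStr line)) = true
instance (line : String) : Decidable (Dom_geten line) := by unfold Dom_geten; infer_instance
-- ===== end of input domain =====

-- B replaces A's split-then-test-each-token design by one left-to-right character
-- scan that never builds the split list (objective: alternative).

-- ===== PORT A =====
-- inner `for dig in it1` loop: flag is the state; break on a non-digit, non-'.()' char
def getenFlag : List Char → Nat → Nat
  | [], flag => flag
  | c :: cs, _flag =>
    if c = '.' ∨ c = ')' ∨ c = '(' then getenFlag cs _flag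
    else if c.isDigit then getenFlag cs 1   -- int(dig) succeeds (exact for single ASCII chars)
    else 0                                  -- ValueError: flag was set to 0, then break

-- outer `for it1 in spl` loop with `ret` and break
def getenLoop : List String → Option String
  | [] => none
  | t :: rest =>
    if t.length < 2 then getenLoop rest
    else if getenFlag t.toList 0 = 1 then some t
    else getenLoop rest

def geten (line : String) : Option String :=
  getenLoop ((PySem.Str.split? line "'").getD [])   -- sep ≠ "", so split? is always `some`

-- ===== PORT B =====
-- Source B's scanner state: current segment buffer, its digit count, its validity flag
def getenScan : List Char → List Char → Nat → Bool → Option String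
  | [], buf, ndig, ok =>
      if ok && decide (ndig ≠ 0) && decide (2 ≤ buf.length) then some (String.ofList buf) else none
  | c :: cs, buf, ndig, ok =>
      if c = '\'' then
        if ok && decide (ndig ≠ 0) && decide (2 ≤ buf.length) then some (String.ofList buf)
        else getenScan cs [] 0 true
      else if '0' ≤ c ∧ c ≤ '9' then getenScan cs (buf ++ [c]) (ndig + 1) ok
      else if c = '.' ∨ c = '(' ∨ c = ')' then getenScan cs (buf ++ [c]) ndig ok
      else getenScan cs (buf ++ [c]) ndig false

def geten_alt (line : String) : Option String := getenScan line.toList [] 0 true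

-- ===== PRECONDITION & SPEC =====
def Spec_geten (line : String) (out : Option String) : Prop := out = geten_alt line
instance (line : String) (out : Option String) : Decidable (Spec_geten line out) := by unfold Spec_geten; infer_instance

-- ===== CLAIM (what is proved, stated in full; the proofs are below) =====
def Claim_equal_geten : Prop := ∀ (line : String), Dom_geten line → Spec_geten line (geten line)

-- ===== LEMMAS AND PROOFS =====

-- a char allowed inside a valid token
def allowedC (c : Char) : Bool := c.isDigit || c = '.' || c = '(' || c = ')'

-- split on a single separator char: (first segment, remaining segments)
def splitC (q : Char) : List Char → List Char × List (List Char)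
  | [] => ([], [])
  | c :: cs =>
    let p := splitC q cs
    if c = q then ([], p.1 :: p.2) else (c :: p.1, p.2)

-- the common search: first segment with ≥2 chars, all allowed, at least one digit
def tokTest (l : List Char) : Bool :=
  l.all allowedC && l.any Char.isDigit && decide (2 ≤ l.length)

theorem tokTest_def (l : List Char) :
    tokTest l = (l.all allowedC && l.any Char.isDigit && decide (2 ≤ l.length)) := rfl

def tokSearch : List Char → List (List Char) → Option String
  | h, t =>
    if tokTest h then some (String.ofList h)
    else match t with
      | [] => none
      | h' :: t' => tokSearch h' t'

theorem getenFlag_eq (cs : List Char) (flag : Nat) :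
    getenFlag cs flag =
      if cs.all allowedC then (if cs.any Char.isDigit then 1 else flag) else 0 := by
  induction cs generalizing flag with
  | nil => simp [getenFlag]
  | cons c cs ih =>
    by_cases hp : c = '.' ∨ c = ')' ∨ c = '('
    · have ha : allowedC c = true := by
        rcases hp with h | h | h <;> subst h <;> decide
      have hd : c.isDigit = false := by
        rcases hp with h | h | h <;> subst h <;> decide
      simp [getenFlag, hp, ha, hd, ih]
    · by_cases hdg : c.isDigit
      · have ha : allowedC c = true := by simp [allowedC, hdg]
        simp [getenFlag, hp, hdg, ha, ih]
      · have ha : allowedC c = false := by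
          simp only [allowedC, Bool.or_eq_false_iff, decide_eq_false_iff_not]
          refine ⟨⟨⟨by simpa using hdg, ?_⟩, ?_⟩, ?_⟩ <;> intro h <;> subst h <;> tauto
        simp [getenFlag, hp, hdg, ha]

theorem getenLoop_cons (h : List Char) (t : List String) :
    getenLoop (String.ofList h :: t) =
      if tokTest h then some (String.ofList h) else getenLoop t := by
  simp only [getenLoop, String.length_ofList, String.toList_ofList, getenFlag_eq, tokTest]
  by_cases h1 : h.all allowedC <;> by_cases h2 : h.any Char.isDigit <;>
    by_cases h3 : h.length < 2 <;> simp [h1, h2, h3]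


theorem getenLoop_eq (h : List Char) (t : List (List Char)) :
    getenLoop ((h :: t).map String.ofList) = tokSearch h t := by
  induction t generalizing h with
  | nil =>
    rw [List.map_cons, List.map_nil, getenLoop_cons, tokSearch]
    by_cases ht : tokTest h <;> simp [ht, getenLoop]
  | cons h' t' ih =>
    rw [List.map_cons, getenLoop_cons, tokSearch]
    by_cases ht : tokTest h
    · simp [ht]
    · simpa [ht] using ih h'

theorem countP_ne_any (l : List Char) :
    decide (l.countP (fun c => Char.isDigit c) ≠ 0) = l.any Char.isDigit := by
  rw [Bool.eq_iff_iff]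
  rw [decide_eq_true_iff, Ne, List.countP_eq_zero, List.any_eq_true]
  push Not
  simp

theorem digit_iff (c : Char) : ('0' ≤ c ∧ c ≤ '9') ↔ c.isDigit = true := by
  simp [Char.isDigit, Char.le_def]

theorem getenScan_eq (cs : List Char) : ∀ (buf : List Char) (ndig : Nat) (ok : Bool),
    ndig = buf.countP (fun c => Char.isDigit c) → ok = buf.all allowedC →
    getenScan cs buf ndig ok =
      tokSearch (buf ++ (splitC '\'' cs).1) (splitC '\'' cs).2 := by
  induction cs with
  | nil =>
    intro buf ndig ok hn ho
    subst hn ho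
    rw [getenScan, splitC, countP_ne_any, ← tokTest_def, List.append_nil, tokSearch]
  | cons c cs ih =>
    intro buf ndig ok hn ho
    subst hn ho
    rw [getenScan, splitC]
    by_cases hq : c = '\''
    · subst hq
      rw [countP_ne_any, ← tokTest_def]
      have hrec := ih [] 0 true rfl rfl
      rw [List.nil_append] at hrec
      simp only [if_true]
      rw [List.append_nil, tokSearch]
      by_cases ht : tokTest buf
      · simp [ht]
      · simp [ht, hrec]
    · rw [if_neg hq]
      simp only [if_neg hq]
      by_cases hd : '0' ≤ c ∧ c ≤ '9'
      · have hdig : c.isDigit = true := (digit_iff c).mp hd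
        have hall : allowedC c = true := by simp [allowedC, hdig]
        rw [if_pos hd,
          ih (buf ++ [c]) (buf.countP (fun c => Char.isDigit c) + 1) (buf.all allowedC)
            (by simp [hdig]) (by simp [hall])]
        simp [List.append_assoc]
      · have hdig : c.isDigit = false := by
          rw [Bool.eq_false_iff]; intro h; exact hd ((digit_iff c).mpr h)
        rw [if_neg hd]
        by_cases hp : c = '.' ∨ c = '(' ∨ c = ')'
        · have hall : allowedC c = true := by
            rcases hp with h | h | h <;> subst h <;> decide
          rw [if_pos hp,
            ih (buf ++ [c]) (buf.countP (fun c => Char.isDigit c)) (buf.all allowedC)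
              (by simp [hdig]) (by simp [hall])]
          simp [List.append_assoc]
        · have hall : allowedC c = false := by
            simp only [allowedC, Bool.or_eq_false_iff, decide_eq_false_iff_not]
            refine ⟨⟨⟨by simpa using hdig, ?_⟩, ?_⟩, ?_⟩ <;> intro h <;> subst h <;> tauto
          rw [if_neg hp,
            ih (buf ++ [c]) (buf.countP (fun c => Char.isDigit c)) false
              (by simp [hdig]) (by simp [hall])]
          simp [List.append_assoc]

theorem split_go_single (q : Char) (l : List Char) :
    ∀ (fuel : Nat) (cur : List Char) (acc : List (List Char)), l.length ≤ fuel →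
      PySem.Chars.splitOn.go [q] fuel l cur acc =
        acc.reverse ++ (cur.reverse ++ (splitC q l).1) :: (splitC q l).2 := by
  induction l with
  | nil =>
    intro fuel cur acc _
    cases fuel with
    | zero => rw [PySem.Chars.splitOn.go]; simp [splitC]
    | succ f => rw [PySem.Chars.splitOn.go]; simp [splitC]; omega
  | cons c rest ih =>
    intro fuel cur acc hf
    cases fuel with
    | zero => simp at hf
    | succ f =>
      have hf' : rest.length ≤ f := by simpa using hf
      rw [PySem.Chars.splitOn.go]
      by_cases hq : c = q
      · subst hq
        have hpre : ([c].isPrefixOf (c :: rest)) = true := by simp [List.isPrefixOf]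
        simp only [hpre, if_true, List.length_cons, List.length_nil, List.drop_succ_cons,
          List.drop_zero]
        rw [ih f [] (cur.reverse :: acc) hf', splitC]
        simp
      · have hpre : ([q].isPrefixOf (c :: rest)) = false := by
          simp [List.isPrefixOf]; intro h; exact hq h.symm
        simp only [hpre, Bool.false_eq_true, if_false]
        rw [ih f (c :: cur) acc hf', splitC]
        simp [hq]

theorem splitOn_single (q : Char) (l : List Char) :
    PySem.Chars.splitOn l [q] = (splitC q l).1 :: (splitC q l).2 := by
  rw [PySem.Chars.splitOn, split_go_single q l (l.length + 1) [] [] (by omega)]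
  simp

-- ===== VERDICT (by name: the statement is the Claim_ definition above) =====
theorem geten_spec : Claim_equal_geten := by
  intro line _
  unfold Spec_geten geten geten_alt
  rw [PySem.Str.split?, show ("'" : String).toList = ['\''] from rfl]
  rw [PySem.Chars.split?, splitOn_single]
  simp only [List.isEmpty_cons, Bool.false_eq_true, if_false, Option.map_some, Option.getD_some]
  rw [getenLoop_eq, getenScan_eq line.toList [] 0 true rfl rfl]
  simp
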